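-- pv_equiv track=rewrite | github.com/PatilHiteshB/Competetive | Python/LargestSumSubArrayWithAtleastKElements/LargestSumSubArrayWithAtleastKElements.py | maxSumWithK
-- ===== SOURCE A (Python) =====
-- def maxSumWithK( arr, n, k):
--
--     su = 0
--
--     for i in range(k):
--
--         su += arr[i]
--
--     answer = su
--     last = start = 0
--     end = k
--
--     while end < n:
--
--         last += arr[start]
--         start += 1
--
--         su += arr[end]
--         answer = max(answer, su)
--
--         if last < 0:
--             su = su - last
--             answer = max(answer, su)
--             last = 0
--
--         end+=1
--
--     return answer
-- ===== SOURCE B (Python) =====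
-- def maxSumWithK(arr, n, k):
--     # prefix-sum + running-minimum formulation:
--     # answer = max over j in [k, n] of prefix[j] - min(prefix[0..j-k])
--     su = 0
--     for i in range(k):
--         su += arr[i]
--     pref = su      # prefix sum of arr[0..j-1]
--     best = su
--     run = 0        # prefix[j-k]
--     mn = 0         # min of prefix[0..j-k]
--     for j in range(k, n):
--         run += arr[j - k]
--         if run < mn:
--             mn = run
--         pref += arr[j]
--         if pref - mn > best:
--             best = pref - mn
--     return best
-- ===== Notes on version B (the rewrite author's own statement) =====
-- stated objective: alternative
-- what changed: Replaces A's sliding-window-with-greedy-prefix-drop (su/last/start bookkeeping with a reset branch) by the prefix-sum formulation: one pass maintaining the running prefix sum and the running minimum prefix k positions back, taking best = max of prefix[j] - min(prefix[0..j-k]).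
import Mathlib
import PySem

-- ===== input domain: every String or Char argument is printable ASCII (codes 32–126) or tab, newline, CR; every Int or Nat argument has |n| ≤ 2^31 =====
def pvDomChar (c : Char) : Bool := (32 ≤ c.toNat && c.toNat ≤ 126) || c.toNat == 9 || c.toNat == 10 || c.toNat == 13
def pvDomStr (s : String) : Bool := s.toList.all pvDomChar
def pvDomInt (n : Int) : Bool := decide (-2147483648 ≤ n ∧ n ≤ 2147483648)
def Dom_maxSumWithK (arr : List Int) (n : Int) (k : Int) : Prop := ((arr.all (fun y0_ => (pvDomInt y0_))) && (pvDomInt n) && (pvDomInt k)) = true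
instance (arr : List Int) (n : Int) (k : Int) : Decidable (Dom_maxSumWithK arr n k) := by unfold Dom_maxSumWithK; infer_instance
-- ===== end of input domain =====

-- B is an alternative same-cost algorithm (prefix sums + running minimum prefix) in place of
-- A's sliding window with greedy negative-prefix dropping; equivalence is about the return value.

-- ===== PORT A =====
-- A's while loop: state (su, answer, last, start, end), runs while end < n.
def maxSumWithKLoop (arr : List Int) (n k : Int) (su answer last start e : Int) : Int :=
  if _h : e < n then
    let last1 := last + PySem.List.pyGetD arr start 0
    let start1 := start + 1
    let su1 := su + PySem.List.pyGetD arr e 0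
    let answer1 := max answer su1
    if last1 < 0 then
      maxSumWithKLoop arr n k (su1 - last1) (max answer1 (su1 - last1)) 0 start1 (e + 1)
    else
      maxSumWithKLoop arr n k su1 answer1 last1 start1 (e + 1)
  else answer
termination_by (n - e).toNat
decreasing_by all_goals omega

def maxSumWithK (arr : List Int) (n : Int) (k : Int) : Int :=
  let su := (PySem.List.pyRange 0 k 1).foldl (fun s i => s + PySem.List.pyGetD arr i 0) 0
  maxSumWithKLoop arr n k su su 0 0 k

-- ===== PORT B =====
-- Source B's loop body: state (run, mn, pref, best), one step for index j.
def maxSumWithKStep (arr : List Int) (k : Int) (s : Int × Int × Int × Int) (j : Int) : Int × Int × Int × Int :=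
  let run1 := s.1 + PySem.List.pyGetD arr (j - k) 0
  let mn1 := if run1 < s.2.1 then run1 else s.2.1
  let pref1 := s.2.2.1 + PySem.List.pyGetD arr j 0
  let best1 := if pref1 - mn1 > s.2.2.2 then pref1 - mn1 else s.2.2.2
  (run1, mn1, pref1, best1)

def maxSumWithK_alt (arr : List Int) (n : Int) (k : Int) : Int :=
  let su := (PySem.List.pyRange 0 k 1).foldl (fun s i => s + PySem.List.pyGetD arr i 0) 0
  ((PySem.List.pyRange k n 1).foldl (maxSumWithKStep arr k) (0, 0, su, su)).2.2.2

-- ===== PRECONDITION & SPEC =====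
-- Pre_ excludes exactly the inputs on which Python A raises IndexError: k > len(arr) in the
-- first loop, or (when the window loop runs, k < n) an index of arr[start]/arr[end] out of range.
def Pre_maxSumWithK (arr : List Int) (n : Int) (k : Int) : Prop :=
  k ≤ (arr.length : Int) ∧
    (k < n → (-(arr.length : Int) ≤ k ∧ n ≤ (arr.length : Int) ∧ n - k ≤ (arr.length : Int)))
instance (arr : List Int) (n : Int) (k : Int) : Decidable (Pre_maxSumWithK arr n k) := by
  unfold Pre_maxSumWithK; infer_instance

def pvWitness_maxSumWithK : List Int × Int × Int := ([1, -2, 3], 3, 2)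

def Spec_maxSumWithK (arr : List Int) (n : Int) (k : Int) (out : Int) : Prop := out = maxSumWithK_alt arr n k
instance (arr : List Int) (n : Int) (k : Int) (out : Int) : Decidable (Spec_maxSumWithK arr n k out) := by unfold Spec_maxSumWithK; infer_instance

-- ===== CLAIM (what is proved, stated in full; the proofs are below) =====
def Claim_equal_maxSumWithK : Prop := ∀ (arr : List Int) (n : Int) (k : Int), Dom_maxSumWithK arr n k → Pre_maxSumWithK arr n k → Spec_maxSumWithK arr n k (maxSumWithK arr n k)

-- ===== LEMMAS AND PROOFS =====

-- Invariant tying A's loop state to B's fold state: su = pref - mn, last = run - mn, 0 ≤ last,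
-- start = e - k; both answers coincide.
lemma maxSumWithK_loop_eq (arr : List Int) (n k : Int) (fuel : Nat) :
    ∀ (e su answer last run mn pref : Int), (n - e).toNat = fuel →
      su = pref - mn → last = run - mn → 0 ≤ last →
      maxSumWithKLoop arr n k su answer last (e - k) e
        = ((PySem.List.pyRange e n 1).foldl (maxSumWithKStep arr k) (run, mn, pref, answer)).2.2.2 := by
  induction fuel with
  | zero =>
    intro e su answer last run mn pref hf h1 h2 h3
    have hen : ¬ e < n := by omega
    rw [maxSumWithKLoop, dif_neg hen, PySem.List.pyRange_one_eq_nil (by omega)]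
    simp
  | succ m ih =>
    intro e su answer last run mn pref hf h1 h2 h3
    by_cases hen : e < n
    · rw [maxSumWithKLoop, dif_pos hen, PySem.List.pyRange_one_cons hen]
      simp only [List.foldl_cons]
      have harr : (e + 1) - k = (e - k) + 1 := by ring
      set g1 := PySem.List.pyGetD arr (e - k) 0 with hg1
      set g2 := PySem.List.pyGetD arr e 0 with hg2
      by_cases hl : last + g1 < 0
      · rw [if_pos hl]
        have hstep : maxSumWithKStep arr k (run, mn, pref, answer) e
            = (run + g1, run + g1, pref + g2,
               max (max answer (su + g2)) (su + g2 - (last + g1))) := by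
          simp only [maxSumWithKStep, ← hg1, ← hg2, max_def, Prod.mk.injEq]
          split_ifs <;> and_intros <;> first | trivial | omega
        rw [hstep]
        have := ih (e + 1) (su + g2 - (last + g1))
          (max (max answer (su + g2)) (su + g2 - (last + g1)))
          0 (run + g1) (run + g1) (pref + g2) (by omega) (by omega) (by omega) (by omega)
        rw [harr] at this
        exact this
      · rw [if_neg hl]
        have hstep : maxSumWithKStep arr k (run, mn, pref, answer) e
            = (run + g1, mn, pref + g2, max answer (su + g2)) := by
          simp only [maxSumWithKStep, ← hg1, ← hg2, max_def, Prod.mk.injEq]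
          split_ifs <;> and_intros <;> first | trivial | omega
        rw [hstep]
        have := ih (e + 1) (su + g2) (max answer (su + g2))
          (last + g1) (run + g1) mn (pref + g2) (by omega) (by omega) (by omega) (by omega)
        rw [harr] at this
        exact this
    · omega

-- ===== VERDICT (by name: the statement is the Claim_ definition above) =====
theorem maxSumWithK_spec : Claim_equal_maxSumWithK := by
  intro arr n k _hdom _hpre
  unfold Spec_maxSumWithK maxSumWithK maxSumWithK_alt
  have h := maxSumWithK_loop_eq arr n k (n - k).toNat k
    ((PySem.List.pyRange 0 k 1).foldl (fun s i => s + PySem.List.pyGetD arr i 0) 0)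
    ((PySem.List.pyRange 0 k 1).foldl (fun s i => s + PySem.List.pyGetD arr i 0) 0)
    0 0 0
    ((PySem.List.pyRange 0 k 1).foldl (fun s i => s + PySem.List.pyGetD arr i 0) 0)
    rfl (by ring) (by ring) le_rfl
  simpa using h
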